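-- pv_equiv track=rewrite | github.com/suryanshukla592/HectoClash_GoLand | check_hectoc.py | get_digit_splits
-- ===== SOURCE A (Python) =====
-- def get_digit_splits(s):
--     results = []
--     n = len(s)
--
--     def backtrack(index, path):
--         if index == n:
--             results.append(path[:])
--             return
--         for i in range(index + 1, n + 1):
--             part = s[index:i]
--             # Skip invalid numbers with leading zero
--             if len(part) > 1 and part[0] == '0':
--                 continue
--             path.append(int(part))
--             backtrack(i, path)
--             path.pop()
--
--     backtrack(0, [])
--     return results
-- ===== SOURCE B (Python) =====
-- def get_digit_splits(s):
--     # Bottom-up DP over suffixes: dp[i] lists every split of s[i:], built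
--     # from the end; no shared mutable path, no recursion.
--     n = len(s)
--     dp = [[] for _ in range(n + 1)]
--     dp[n] = [[]]
--     for i in range(n - 1, -1, -1):
--         dp[i] = [[int(s[i:j])] + tail
--                  for j in range(i + 1, n + 1)
--                  if not (j - i > 1 and s[i] == '0')
--                  for tail in dp[j]]
--     return dp[0]
-- ===== Notes on version B (the rewrite author's own statement) =====
-- stated objective: alternative
-- what changed: Replaced the mutating backtracker (shared path list, results accumulator, recursion with append/pop) by a bottom-up dynamic program that fills dp[i] = all splits of the suffix s[i:] from the end and returns dp[0].
import Mathlib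
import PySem

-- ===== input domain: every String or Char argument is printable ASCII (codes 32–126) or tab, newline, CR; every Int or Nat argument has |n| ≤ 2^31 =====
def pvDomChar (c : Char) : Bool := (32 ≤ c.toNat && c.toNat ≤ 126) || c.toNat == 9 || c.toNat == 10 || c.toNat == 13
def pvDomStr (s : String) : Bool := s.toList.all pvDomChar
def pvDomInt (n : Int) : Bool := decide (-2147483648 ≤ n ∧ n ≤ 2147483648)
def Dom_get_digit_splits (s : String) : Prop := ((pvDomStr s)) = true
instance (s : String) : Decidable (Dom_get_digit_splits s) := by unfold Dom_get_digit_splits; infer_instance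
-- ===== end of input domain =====

-- B replaces A's mutating backtracker by a bottom-up DP over suffixes (alternative decomposition, no speed claim).
-- int(part): on Pre_ every part is a digit string, so ofStr? is some; getD 0 is never used.
def pvParse (cs : List Char) : Int := (PySem.Int.ofStr? (String.mk cs)).getD 0

-- ===== PORT A =====
-- backtrack(index, path): index is carried as the suffix rest = s[index:], i as k = i - index,
-- part = s[index:i] = rest.take k; results is the accumulator the Python mutates.
mutual
def pvBT (rest : List Char) (path : List Int) (results : List (List Int)) : List (List Int) :=
  if rest.isEmpty then results ++ [path]
  else pvLoop rest 1 path results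
termination_by (rest.length, rest.length + 2)
def pvLoop (rest : List Char) (k : Nat) (path : List Int) (results : List (List Int)) : List (List Int) :=
  if h : 0 < k ∧ k ≤ rest.length then
    let part := rest.take k
    let results' :=
      if part.length > 1 ∧ part.headD ' ' = '0' then results
      else pvBT (rest.drop k) (path ++ [pvParse part]) results
    pvLoop rest (k + 1) path results'
  else results
termination_by (rest.length, rest.length + 1 - k)
end

def get_digit_splits (s : String) : List (List Int) := pvBT s.toList [] []

-- ===== PORT B =====
-- dp[i] = [[int(s[i:j])] + tail for j in. if not leading-zero for tail in dp[j]];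
-- pvTables rest = [dp[i], dp[i+1], …, dp[n]] for rest = s[i:], so tabs.getD (k-1) = dp[i+k].
def pvRowB (rest : List Char) (tabs : List (List (List Int))) : List (List Int) :=
  (List.range' 1 rest.length).flatMap (fun k =>
    if (rest.take k).length > 1 ∧ (rest.take k).headD ' ' = '0' then []
    else (tabs.getD (k - 1) []).map (fun tail => pvParse (rest.take k) :: tail))

def pvTables : List Char → List (List (List Int))
  | [] => [[[]]]
  | c :: cs => pvRowB (c :: cs) (pvTables cs) :: pvTables cs

def get_digit_splits_alt (s : String) : List (List Int) := (pvTables s.toList).headD []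

-- ===== PRECONDITION & SPEC =====
-- A calls int(part) on every one-character part, so it raises ValueError unless every character is a digit.
def Pre_get_digit_splits (s : String) : Prop := s.toList.all Char.isDigit = true
instance (s : String) : Decidable (Pre_get_digit_splits s) := by unfold Pre_get_digit_splits; infer_instance
def pvWitness_get_digit_splits : String := "1005"
def Spec_get_digit_splits (s : String) (out : List (List Int)) : Prop := out = get_digit_splits_alt s
instance (s : String) (out : List (List Int)) : Decidable (Spec_get_digit_splits s out) := by unfold Spec_get_digit_splits; infer_instance

-- ===== CLAIM (what is proved, stated in full; the proofs are below) =====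
def Claim_equal_get_digit_splits : Prop := ∀ (s : String), Dom_get_digit_splits s → Pre_get_digit_splits s → Spec_get_digit_splits s (get_digit_splits s)

-- ===== LEMMAS AND PROOFS =====

-- splits of a suffix, as B computes them
def pvSplits (rest : List Char) : List (List Int) := (pvTables rest).headD []

-- the per-part contribution, with the tail table named by the suffix it belongs to
def pvG (rest : List Char) (k : Nat) : List (List Int) :=
  if (rest.take k).length > 1 ∧ (rest.take k).headD ' ' = '0' then []
  else (pvSplits (rest.drop k)).map (fun tail => pvParse (rest.take k) :: tail)

lemma pvTables_getD (rest : List Char) (k : Nat) (hk : k ≤ rest.length) :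
    (pvTables rest).getD k [] = pvSplits (rest.drop k) := by
  induction rest generalizing k with
  | nil =>
    obtain rfl : k = 0 := by simpa using hk
    rfl
  | cons c cs ih =>
    cases k with
    | zero => rfl
    | succ k =>
      simp only [pvTables, List.getD_cons_succ, List.drop_succ_cons]
      exact ih k (by simpa using hk)

lemma pvRowB_eq (c : Char) (cs : List Char) :
    pvRowB (c :: cs) (pvTables cs) = (List.range' 1 (c :: cs).length).flatMap (pvG (c :: cs)) := by
  apply List.flatMap_congr
  intro k hk
  have hk' : 1 ≤ k ∧ k ≤ (c :: cs).length := by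
    have := List.mem_range'_1.mp hk; omega
  unfold pvG
  split
  · rfl
  · have : (pvTables cs).getD (k - 1) [] = pvSplits ((c :: cs).drop k) := by
      have h1 : (c :: cs).drop k = cs.drop (k - 1) := by
        cases k with
        | zero => omega
        | succ k => simp
      rw [h1]
      exact pvTables_getD cs (k - 1) (by simp at hk'; omega)
    rw [this]

lemma pvSplits_cons (c : Char) (cs : List Char) :
    pvSplits (c :: cs) = (List.range' 1 (c :: cs).length).flatMap (pvG (c :: cs)) := by
  show pvRowB (c :: cs) (pvTables cs) = _
  exact pvRowB_eq c cs

lemma pvBT_eq (n : Nat) : ∀ rest : List Char, rest.length ≤ n →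
    ∀ path results, pvBT rest path results = results ++ (pvSplits rest).map (path ++ ·) := by
  induction n with
  | zero =>
    intro rest h path results
    have : rest = [] := List.eq_nil_of_length_eq_zero (by omega)
    subst this
    simp [pvBT, pvSplits, pvTables]
  | succ n ih =>
    intro rest hlen path results
    cases hrest : rest with
    | nil => simp [pvBT, pvSplits, pvTables]
    | cons c cs =>
      subst hrest
      have hloop : ∀ m k, 0 < k → k + m = (c :: cs).length + 1 →
          ∀ path results, pvLoop (c :: cs) k path results =
            results ++ ((List.range' k m).flatMap (pvG (c :: cs))).map (path ++ ·) := by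
        intro m
        induction m with
        | zero =>
          intro k hk hkm path results
          rw [pvLoop]
          simp only [List.range'_zero, List.flatMap_nil, List.map_nil, List.append_nil]
          rw [dif_neg (by omega)]
        | succ m ihm =>
          intro k hk hkm path results
          rw [pvLoop]
          rw [dif_pos (by omega)]
          simp only []
          rw [ihm (k + 1) (by omega) (by omega)]
          rw [List.range'_succ, List.flatMap_cons, List.map_append, ← List.append_assoc]
          congr 1
          unfold pvG
          split
          · simp
          · rw [ih ((c :: cs).drop k) (by have h2 := hkm; simp at h2 ⊢; omega)]
            simp [List.map_map, Function.comp_def]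
      rw [pvBT]
      simp only [List.isEmpty_cons, Bool.false_eq_true, if_false]
      rw [hloop (c :: cs).length 1 (by omega) (by omega), pvSplits_cons]

-- ===== VERDICT (by name: the statement is the Claim_ definition above) =====
theorem get_digit_splits_spec : Claim_equal_get_digit_splits := by
  intro s _ _
  show get_digit_splits s = get_digit_splits_alt s
  unfold get_digit_splits get_digit_splits_alt
  rw [pvBT_eq s.toList.length s.toList le_rfl [] []]
  show (pvSplits s.toList).map _ = pvSplits s.toList
  simp
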